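-- pv_equiv track=rewrite | github.com/Stuycs-K/final-project-4-zhans-hatzigeorgioun | encrypt.py | generate_key_square
-- ===== SOURCE A (Python) =====
-- def generate_key_square(key):
--     alphabet = "ABCDEFGHIKLMNOPQRSTUVWXYZ"
--     key = key.upper().replace("J", "I")
--     key_square = [[None] * 5 for _ in range(5)]
--
--     used_letters = set()
--     row, col = 0, 0
--     for letter in key:
--         if letter not in used_letters:
--             key_square[row][col] = letter
--             used_letters.add(letter)
--             col += 1
--             if col == 5:
--                 col = 0
--                 row += 1
--                 if row == 5:
--                     break
--
--     for letter in alphabet: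
--         if letter != "J" and letter not in used_letters:
--             key_square[row][col] = letter
--             used_letters.add(letter)
--             col += 1
--             if col == 5:
--                 col = 0
--                 row += 1
--                 if row == 5:
--                     break
--
--     return key_square
-- ===== SOURCE B (Python) =====
-- def generate_key_square(key):
--     key = key.upper().replace("J", "I")
--     seen = set()
--     seq = []
--     for ch in key:
--         if ch not in seen:
--             seen.add(ch)
--             seq.append(ch)
--     for ch in "ABCDEFGHIKLMNOPQRSTUVWXYZ":
--         if ch not in seen:
--             seen.add(ch)
--             seq.append(ch)
--     seq = seq[:25]
--     return [seq[i * 5:(i + 1) * 5] for i in range(5)]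
-- ===== Notes on version B (the rewrite author's own statement) =====
-- stated objective: simpler
-- what changed: Replaces A's mutable 5x5 grid threaded with row/col counters and break-laden placement loops by building one flat first-occurrence sequence (key chars then remaining alphabet), truncating it to 25 and reshaping it into rows by slicing.
-- crash fix: On keys whose first 25 distinct characters (after upper-casing and J->I) contain a non-alphabet character, A raises IndexError (it writes past row 4); B returns the 5x5 square of those first 25 distinct characters. — e.g. on generate_key_square("0ABCDEFGHIKLMNOPQRSTUVWXY"): A raises IndexError, B returns [["0", "A", "B", "C", "D"], ["E", "F", "G", "H", "I"], ["K", "L", "M", "N", "O"], ["P", "Q", "R", "S", "T"], ["U", "V",…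
import Mathlib
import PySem

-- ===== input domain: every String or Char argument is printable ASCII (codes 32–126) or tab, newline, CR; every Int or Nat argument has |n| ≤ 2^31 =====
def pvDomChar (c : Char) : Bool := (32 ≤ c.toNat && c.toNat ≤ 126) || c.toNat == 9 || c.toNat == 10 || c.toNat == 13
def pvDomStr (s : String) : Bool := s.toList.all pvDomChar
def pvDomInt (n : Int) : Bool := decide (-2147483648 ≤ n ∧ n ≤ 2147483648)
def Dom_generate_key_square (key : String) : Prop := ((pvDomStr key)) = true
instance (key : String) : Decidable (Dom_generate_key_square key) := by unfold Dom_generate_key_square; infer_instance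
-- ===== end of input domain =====

-- B replaces A's mutable 5x5 grid with row/col counters and break-laden placement loops by
-- building one flat first-occurrence sequence, truncating it to 25 and reshaping by slicing (simpler).


-- ===== PORT A =====
def pvAlphabet : List Char := "ABCDEFGHIKLMNOPQRSTUVWXYZ".toList

-- key_square[row][col] = letter; in range whenever Pre_ holds (row = 5 is Python's IndexError, excluded by Pre_)
def pvSetCell (g : List (List (Option String))) (row col : Nat) (v : String) : List (List (Option String)) :=
  g.set row ((g.getD row []).set col (some v))

-- the first 'for letter in key:' loop of A; state = (key_square, used_letters, row, col)
def pvLoop1 : List Char → List (List (Option String)) → PySem.Set String → Nat → Nat →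
    List (List (Option String)) × PySem.Set String × Nat × Nat
  | [], g, used, row, col => (g, used, row, col)
  | ch :: rest, g, used, row, col =>
    let letter := String.singleton ch
    if letter ∈ used then pvLoop1 rest g used row col
    else
      let g' := pvSetCell g row col letter
      let used' := PySem.Set.add used letter
      if col + 1 = 5 then
        if row + 1 = 5 then (g', used', row + 1, 0)   -- break
        else pvLoop1 rest g' used' (row + 1) 0
      else pvLoop1 rest g' used' row (col + 1)

-- the second 'for letter in alphabet:' loop of A
def pvLoop2 : List Char → List (List (Option String)) → PySem.Set String → Nat → Nat →
    List (List (Option String)) × PySem.Set String × Nat × Nat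
  | [], g, used, row, col => (g, used, row, col)
  | ch :: rest, g, used, row, col =>
    let letter := String.singleton ch
    if letter ≠ "J" ∧ letter ∉ used then
      let g' := pvSetCell g row col letter
      let used' := PySem.Set.add used letter
      if col + 1 = 5 then
        if row + 1 = 5 then (g', used', row + 1, 0)   -- break
        else pvLoop2 rest g' used' (row + 1) 0
      else pvLoop2 rest g' used' row (col + 1)
    else pvLoop2 rest g used row col

def generate_key_square (key : String) : List (List String) :=
  let k := PySem.Str.replace (PySem.Str.upper key) "J" "I"
  let init : List (List (Option String)) := List.replicate 5 (List.replicate 5 (none : Option String))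
  let s1 := pvLoop1 k.toList init PySem.Set.empty 0 0
  let s2 := pvLoop2 pvAlphabet s1.1 s1.2.1 s1.2.2.1 s1.2.2.2
  -- under Pre_ every cell is filled; 'none' is mapped to "" only at the type boundary (unreachable under Pre_)
  s2.1.map (fun r => r.map (fun o => o.getD ""))

-- ===== PORT B =====
-- one dedup pass: for ch in …: if ch not in seen: seen.add(ch); seq.append(ch)
def altScan : List Char → PySem.Set String → List String → PySem.Set String × List String
  | [], seen, seq => (seen, seq)
  | c :: rest, seen, seq =>
    let s := String.singleton c
    if s ∈ seen then altScan rest seen seq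
    else altScan rest (PySem.Set.add seen s) (seq ++ [s])

def generate_key_square_alt (key : String) : List (List String) :=
  let k := PySem.Str.replace (PySem.Str.upper key) "J" "I"
  let p1 := altScan k.toList PySem.Set.empty []
  let p2 := altScan pvAlphabet p1.1 p1.2
  let seq := PySem.List.slice p2.2 none (some 25)   -- seq = seq[:25]
  (PySem.List.pyRange 0 5 1).map (fun i => PySem.List.slice seq (some (i * 5)) (some ((i + 1) * 5)))

-- ===== PRECONDITION & SPEC =====
-- spec-side first-occurrence dedup (accumulator form; independent of both ports)
def pvDistinct : List Char → List String → List String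
  | [], acc => acc
  | c :: rest, acc =>
    if String.singleton c ∈ acc then pvDistinct rest acc
    else pvDistinct rest (acc ++ [String.singleton c])

def pvAlphaStrs : List String := pvAlphabet.map String.singleton

-- Pre_ excludes exactly the keys on which A raises IndexError: those whose first 25 distinct
-- characters (after upper-casing and J->I) contain a non-alphabet character (A then writes to row 5).
def Pre_generate_key_square (key : String) : Prop :=
  (pvDistinct (PySem.Str.replace (PySem.Str.upper key) "J" "I").toList []).length < 25 ∨
  ∀ s ∈ (pvDistinct (PySem.Str.replace (PySem.Str.upper key) "J" "I").toList []).take 25, s ∈ pvAlphaStrs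
instance (key : String) : Decidable (Pre_generate_key_square key) := by unfold Pre_generate_key_square; infer_instance

def pvWitness_generate_key_square : String := "MONARCHY"

-- On keys whose first 25 distinct characters (after upper-casing and J->I) contain a non-alphabet
-- character, A raises IndexError; B returns the 5x5 square of those first 25 distinct characters.
def Raises_generate_key_square (key : String) : Prop :=
  25 ≤ (pvDistinct (PySem.Str.replace (PySem.Str.upper key) "J" "I").toList []).length ∧
  ∃ s ∈ (pvDistinct (PySem.Str.replace (PySem.Str.upper key) "J" "I").toList []).take 25, s ∉ pvAlphaStrs
instance (key : String) : Decidable (Raises_generate_key_square key) := by unfold Raises_generate_key_square; infer_instance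

def pvRaiseWitness_generate_key_square : String := "0ABCDEFGHIKLMNOPQRSTUVWXY"
def pvRaiseWitnessOut_generate_key_square : List (List String) :=
  [["0", "A", "B", "C", "D"], ["E", "F", "G", "H", "I"], ["K", "L", "M", "N", "O"],
   ["P", "Q", "R", "S", "T"], ["U", "V", "W", "X", "Y"]]

def Spec_generate_key_square (key : String) (out : List (List String)) : Prop := out = generate_key_square_alt key
instance (key : String) (out : List (List String)) : Decidable (Spec_generate_key_square key out) := by unfold Spec_generate_key_square; infer_instance

-- ===== CLAIM (what is proved, stated in full; the proofs are below) =====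
def Claim_equal_generate_key_square : Prop := ∀ (key : String), Dom_generate_key_square key → Pre_generate_key_square key → Spec_generate_key_square key (generate_key_square key)

def Claim_raises_generate_key_square : Prop := (∀ (key : String), Dom_generate_key_square key → Raises_generate_key_square key → ¬ Pre_generate_key_square key) ∧ (Dom_generate_key_square (pvRaiseWitness_generate_key_square) ∧ Raises_generate_key_square (pvRaiseWitness_generate_key_square) ∧ generate_key_square_alt (pvRaiseWitness_generate_key_square) = pvRaiseWitnessOut_generate_key_square)

-- ===== LEMMAS AND PROOFS =====

-- A's placement process on a flat sequence: append unseen chars, stop at 25 cells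
def capScan : List Char → List String → List String
  | [], l => l
  | c :: rest, l =>
    if String.singleton c ∈ l then capScan rest l
    else if l.length + 1 = 25 then l ++ [String.singleton c]
    else capScan rest (l ++ [String.singleton c])

-- the grid determined by a flat list of already-placed letters
def mkGrid (l : List String) : List (List (Option String)) :=
  (List.range 5).map (fun r => (List.range 5).map (fun c =>
    if r * 5 + c < l.length then some (l.getD (r * 5 + c) "") else none))

lemma mkGrid_nil : mkGrid [] = List.replicate 5 (List.replicate 5 (none : Option String)) := rfl

set_option maxHeartbeats 2000000 in
lemma set_mkGrid (l : List String) (v : String) (h : l.length < 25) :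
    pvSetCell (mkGrid l) (l.length / 5) (l.length % 5) v = mkGrid (l ++ [v]) := by
  rcases l with _ | ⟨a0, l⟩
  · simp [pvSetCell, mkGrid, List.range_succ]
  rcases l with _ | ⟨a1, l⟩
  · simp [pvSetCell, mkGrid, List.range_succ]
  rcases l with _ | ⟨a2, l⟩
  · simp [pvSetCell, mkGrid, List.range_succ]
  rcases l with _ | ⟨a3, l⟩
  · simp [pvSetCell, mkGrid, List.range_succ]
  rcases l with _ | ⟨a4, l⟩
  · simp [pvSetCell, mkGrid, List.range_succ]
  rcases l with _ | ⟨a5, l⟩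
  · simp [pvSetCell, mkGrid, List.range_succ]
  rcases l with _ | ⟨a6, l⟩
  · simp [pvSetCell, mkGrid, List.range_succ]
  rcases l with _ | ⟨a7, l⟩
  · simp [pvSetCell, mkGrid, List.range_succ]
  rcases l with _ | ⟨a8, l⟩
  · simp [pvSetCell, mkGrid, List.range_succ]
  rcases l with _ | ⟨a9, l⟩
  · simp [pvSetCell, mkGrid, List.range_succ]
  rcases l with _ | ⟨a10, l⟩
  · simp [pvSetCell, mkGrid, List.range_succ]
  rcases l with _ | ⟨a11, l⟩
  · simp [pvSetCell, mkGrid, List.range_succ]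
  rcases l with _ | ⟨a12, l⟩
  · simp [pvSetCell, mkGrid, List.range_succ]
  rcases l with _ | ⟨a13, l⟩
  · simp [pvSetCell, mkGrid, List.range_succ]
  rcases l with _ | ⟨a14, l⟩
  · simp [pvSetCell, mkGrid, List.range_succ]
  rcases l with _ | ⟨a15, l⟩
  · simp [pvSetCell, mkGrid, List.range_succ]
  rcases l with _ | ⟨a16, l⟩
  · simp [pvSetCell, mkGrid, List.range_succ]
  rcases l with _ | ⟨a17, l⟩
  · simp [pvSetCell, mkGrid, List.range_succ]
  rcases l with _ | ⟨a18, l⟩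
  · simp [pvSetCell, mkGrid, List.range_succ]
  rcases l with _ | ⟨a19, l⟩
  · simp [pvSetCell, mkGrid, List.range_succ]
  rcases l with _ | ⟨a20, l⟩
  · simp [pvSetCell, mkGrid, List.range_succ]
  rcases l with _ | ⟨a21, l⟩
  · simp [pvSetCell, mkGrid, List.range_succ]
  rcases l with _ | ⟨a22, l⟩
  · simp [pvSetCell, mkGrid, List.range_succ]
  rcases l with _ | ⟨a23, l⟩
  · simp [pvSetCell, mkGrid, List.range_succ]
  rcases l with _ | ⟨a24, l⟩
  · simp [pvSetCell, mkGrid, List.range_succ]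
  · simp at h; omega

lemma loop1_eq (cs : List Char) : ∀ (l : List String), l.Nodup → l.length < 25 →
    pvLoop1 cs (mkGrid l) l (l.length / 5) (l.length % 5)
      = (mkGrid (capScan cs l), capScan cs l, (capScan cs l).length / 5, (capScan cs l).length % 5) := by
  induction cs with
  | nil => intro l _ _; rfl
  | cons c rest ih =>
    intro l hnd hlen
    by_cases hm : String.singleton c ∈ l
    · simpa [pvLoop1, capScan, hm] using ih l hnd hlen
    · have hadd : PySem.Set.add l (String.singleton c) = l ++ [String.singleton c] :=
        PySem.Set.add_of_not_mem hm
      have hnd' : (l ++ [String.singleton c]).Nodup :=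
        (List.perm_append_singleton _ _).nodup_iff.2 (List.nodup_cons.2 ⟨hm, hnd⟩)
      have hlen' : (l ++ [String.singleton c]).length = l.length + 1 := by simp
      by_cases hcol : l.length % 5 + 1 = 5
      · by_cases hrow : l.length / 5 + 1 = 5
        · have h24 : l.length = 24 := by omega
          have h25 : l.length + 1 = 25 := by omega
          simp only [pvLoop1, capScan, hm, hcol, hrow, h25, if_true, if_false, ite_true, ite_false,
            if_neg hm, if_pos]
          rw [set_mkGrid l _ hlen, hadd]
          simp [hlen', h24]
        · have h25 : l.length + 1 ≠ 25 := by omega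
          have e1 : (l ++ [String.singleton c]).length / 5 = l.length / 5 + 1 := by
            rw [hlen']; omega
          have e2 : (l ++ [String.singleton c]).length % 5 = 0 := by rw [hlen']; omega
          have hih := ih (l ++ [String.singleton c]) hnd' (by rw [hlen']; omega)
          rw [e1, e2] at hih
          simp only [pvLoop1, capScan, hm, hcol, hrow, h25, if_true, if_false, ite_true, ite_false,
            if_neg hm, if_pos]
          rw [set_mkGrid l _ hlen, hadd]
          exact hih
      · have h25 : l.length + 1 ≠ 25 := by omega
        have e1 : (l ++ [String.singleton c]).length / 5 = l.length / 5 := by rw [hlen']; omega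
        have e2 : (l ++ [String.singleton c]).length % 5 = l.length % 5 + 1 := by rw [hlen']; omega
        have hih := ih (l ++ [String.singleton c]) hnd' (by rw [hlen']; omega)
        rw [e1, e2] at hih
        simp only [pvLoop1, capScan, hm, hcol, h25, if_true, if_false, ite_true, ite_false,
          if_neg hm, if_pos]
        rw [set_mkGrid l _ hlen, hadd]
        exact hih

lemma loop2_eq_loop1 (cs : List Char) (h : ∀ c ∈ cs, String.singleton c ≠ "J") :
    ∀ g u row col, pvLoop2 cs g u row col = pvLoop1 cs g u row col := by
  induction cs with
  | nil => intro g u row col; rfl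
  | cons c rest ih =>
    intro g u row col
    have hj : String.singleton c ≠ "J" := h c (by simp)
    have h' : ∀ x ∈ rest, String.singleton x ≠ "J" := fun x hx => h x (by simp [hx])
    by_cases hm : String.singleton c ∈ u
    · simp [pvLoop2, pvLoop1, hm, hj, ih h']
    · simp [pvLoop2, pvLoop1, hm, hj, ih h']

lemma loop2_all_seen (cs : List Char) : ∀ (g : List (List (Option String))) (u : PySem.Set String) row col,
    (∀ c ∈ cs, String.singleton c ∈ u) → pvLoop2 cs g u row col = (g, u, row, col) := by
  induction cs with
  | nil => intro g u row col _; rfl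
  | cons c rest ih =>
    intro g u row col h
    have hm : String.singleton c ∈ u := h c (by simp)
    have hstep : pvLoop2 (c :: rest) g u row col = pvLoop2 rest g u row col := by
      simp [pvLoop2, hm]
    rw [hstep]
    exact ih g u row col (fun x hx => h x (by simp [hx]))

lemma altScan_eq (cs : List Char) : ∀ (l : List String), l.Nodup →
    altScan cs l l = (pvDistinct cs l, pvDistinct cs l) := by
  induction cs with
  | nil => intro l _; rfl
  | cons c rest ih =>
    intro l hnd
    by_cases hm : String.singleton c ∈ l
    · simpa [altScan, pvDistinct, hm] using ih l hnd
    · have hadd : PySem.Set.add l (String.singleton c) = l ++ [String.singleton c] :=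
        PySem.Set.add_of_not_mem hm
      have hnd' : (l ++ [String.singleton c]).Nodup :=
        (List.perm_append_singleton _ _).nodup_iff.2 (List.nodup_cons.2 ⟨hm, hnd⟩)
      simpa [altScan, pvDistinct, hm, hadd] using ih (l ++ [String.singleton c]) hnd'

lemma pvDistinct_prefix (cs : List Char) : ∀ (l : List String), ∃ t, pvDistinct cs l = l ++ t := by
  induction cs with
  | nil => intro l; exact ⟨[], by simp [pvDistinct]⟩
  | cons c rest ih =>
    intro l
    by_cases hm : String.singleton c ∈ l
    · simpa [pvDistinct, hm] using ih l
    · obtain ⟨t, ht⟩ := ih (l ++ [String.singleton c])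
      exact ⟨String.singleton c :: t, by simp [pvDistinct, hm, ht]⟩

lemma pvDistinct_nodup (cs : List Char) : ∀ (l : List String), l.Nodup → (pvDistinct cs l).Nodup := by
  induction cs with
  | nil => intro l h; exact h
  | cons c rest ih =>
    intro l hnd
    by_cases hm : String.singleton c ∈ l
    · simpa [pvDistinct, hm] using ih l hnd
    · have hnd' : (l ++ [String.singleton c]).Nodup :=
        (List.perm_append_singleton _ _).nodup_iff.2 (List.nodup_cons.2 ⟨hm, hnd⟩)
      simpa [pvDistinct, hm] using ih _ hnd'

lemma capScan_nodup (cs : List Char) : ∀ (l : List String), l.Nodup → (capScan cs l).Nodup := by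
  induction cs with
  | nil => intro l h; exact h
  | cons c rest ih =>
    intro l hnd
    by_cases hm : String.singleton c ∈ l
    · simpa [capScan, hm] using ih l hnd
    · have hnd' : (l ++ [String.singleton c]).Nodup :=
        (List.perm_append_singleton _ _).nodup_iff.2 (List.nodup_cons.2 ⟨hm, hnd⟩)
      by_cases h25 : l.length + 1 = 25
      · simpa [capScan, hm, h25] using hnd'
      · simpa [capScan, hm, h25] using ih _ hnd'

lemma capScan_len_le (cs : List Char) : ∀ (l : List String), l.length < 25 → (capScan cs l).length ≤ 25 := by
  induction cs with
  | nil => intro l h; simp only [capScan]; omega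
  | cons c rest ih =>
    intro l hl
    by_cases hm : String.singleton c ∈ l
    · simpa [capScan, hm] using ih l hl
    · by_cases h25 : l.length + 1 = 25
      · simp [capScan, hm, h25]
      · simpa [capScan, hm, h25] using ih (l ++ [String.singleton c]) (by simp; omega)

lemma capScan_take (cs : List Char) : ∀ (l : List String), l.length < 25 →
    capScan cs l = (pvDistinct cs l).take 25 := by
  induction cs with
  | nil => intro l h; simp [capScan, pvDistinct, List.take_of_length_le (le_of_lt h)]
  | cons c rest ih =>
    intro l h
    by_cases hm : String.singleton c ∈ l
    · simpa [capScan, pvDistinct, hm] using ih l h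
    · by_cases h25 : l.length + 1 = 25
      · obtain ⟨t, ht⟩ := pvDistinct_prefix rest (l ++ [String.singleton c])
        have hlen : (l ++ [String.singleton c]).length = 25 := by simp; omega
        simp only [capScan, pvDistinct, hm, h25, if_true, if_false, ite_true, ite_false,
          if_neg hm, if_pos]
        rw [ht, List.take_left' hlen]
      · simp only [capScan, pvDistinct, hm, h25, if_true, if_false, ite_true, ite_false,
          if_neg hm, if_pos]
        exact ih _ (by simp; omega)

lemma capScan_lt (cs : List Char) : ∀ (l : List String), l.length < 25 →
    (capScan cs l).length < 25 → capScan cs l = pvDistinct cs l := by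
  induction cs with
  | nil => intro l _ _; rfl
  | cons c rest ih =>
    intro l hl hres
    by_cases hm : String.singleton c ∈ l
    · simp only [capScan, pvDistinct, hm, if_pos, ite_true]
      simp only [capScan, hm, if_pos, ite_true] at hres
      exact ih l hl hres
    · by_cases h25 : l.length + 1 = 25
      · exfalso
        simp only [capScan, hm, h25, if_neg hm, if_pos, ite_true, ite_false] at hres
        simp at hres
        omega
      · simp only [capScan, pvDistinct, hm, h25, if_neg hm, if_pos, ite_true, ite_false]
        simp only [capScan, hm, h25, if_neg hm, if_pos, ite_true, ite_false] at hres
        exact ih _ (by simp; omega) hres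

lemma capScan_prefix (cs : List Char) : ∀ (l : List String), ∃ t, capScan cs l = l ++ t := by
  induction cs with
  | nil => intro l; exact ⟨[], by simp [capScan]⟩
  | cons c rest ih =>
    intro l
    by_cases hm : String.singleton c ∈ l
    · simpa [capScan, hm] using ih l
    · by_cases h25 : l.length + 1 = 25
      · exact ⟨[String.singleton c], by simp [capScan, hm, h25]⟩
      · obtain ⟨t, ht⟩ := ih (l ++ [String.singleton c])
        exact ⟨String.singleton c :: t, by simp [capScan, hm, h25, ht]⟩

lemma capScan_mem_or_full (cs : List Char) : ∀ (l : List String), ∀ c ∈ cs,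
    (capScan cs l).length = 25 ∨ String.singleton c ∈ capScan cs l := by
  induction cs with
  | nil => intro l x hx; simp at hx
  | cons c rest ih =>
    intro l x hx
    rcases List.mem_cons.1 hx with rfl | hx'
    · by_cases hm : String.singleton x ∈ l
      · obtain ⟨t, ht⟩ := capScan_prefix rest l
        right; simp only [capScan, hm, if_pos, ite_true]
        rw [ht]; exact List.mem_append_left _ hm
      · by_cases h25 : l.length + 1 = 25
        · right; simp [capScan, hm, h25]
        · obtain ⟨t, ht⟩ := capScan_prefix rest (l ++ [String.singleton x])
          right; simp only [capScan, hm, h25, if_neg hm, if_pos, ite_true, ite_false]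
          rw [ht]; exact List.mem_append_left _ (by simp)
    · by_cases hm : String.singleton c ∈ l
      · simpa [capScan, hm] using ih l x hx'
      · by_cases h25 : l.length + 1 = 25
        · left; simp [capScan, hm, h25]
        · simpa [capScan, hm, h25] using ih (l ++ [String.singleton c]) x hx'

set_option maxHeartbeats 2000000 in
lemma final_shape (l : List String) (h : l.length = 25) :
    (mkGrid l).map (fun r => r.map (fun o => o.getD ""))
      = (PySem.List.pyRange 0 5 1).map (fun i => PySem.List.slice l (some (i * 5)) (some ((i + 1) * 5))) := by
  rcases l with _ | ⟨a0, l⟩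
  · simp at h
  rcases l with _ | ⟨a1, l⟩
  · simp at h
  rcases l with _ | ⟨a2, l⟩
  · simp at h
  rcases l with _ | ⟨a3, l⟩
  · simp at h
  rcases l with _ | ⟨a4, l⟩
  · simp at h
  rcases l with _ | ⟨a5, l⟩
  · simp at h
  rcases l with _ | ⟨a6, l⟩
  · simp at h
  rcases l with _ | ⟨a7, l⟩
  · simp at h
  rcases l with _ | ⟨a8, l⟩
  · simp at h
  rcases l with _ | ⟨a9, l⟩
  · simp at h
  rcases l with _ | ⟨a10, l⟩
  · simp at h
  rcases l with _ | ⟨a11, l⟩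
  · simp at h
  rcases l with _ | ⟨a12, l⟩
  · simp at h
  rcases l with _ | ⟨a13, l⟩
  · simp at h
  rcases l with _ | ⟨a14, l⟩
  · simp at h
  rcases l with _ | ⟨a15, l⟩
  · simp at h
  rcases l with _ | ⟨a16, l⟩
  · simp at h
  rcases l with _ | ⟨a17, l⟩
  · simp at h
  rcases l with _ | ⟨a18, l⟩
  · simp at h
  rcases l with _ | ⟨a19, l⟩
  · simp at h
  rcases l with _ | ⟨a20, l⟩
  · simp at h
  rcases l with _ | ⟨a21, l⟩
  · simp at h
  rcases l with _ | ⟨a22, l⟩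
  · simp at h
  rcases l with _ | ⟨a23, l⟩
  · simp at h
  rcases l with _ | ⟨a24, l⟩
  · simp at h
  rcases l with _ | ⟨a25, l⟩
  · simp [mkGrid, List.range_succ, PySem.List.pyRange, PySem.List.slice, PySem.List.clampIdx]
  · simp at h

-- ===== VERDICT (by name: the statement is the Claim_ definition above) =====
set_option maxRecDepth 8192 in
theorem generate_key_square_spec : Claim_equal_generate_key_square := by
  intro key hdom hpre
  unfold Spec_generate_key_square
  unfold Pre_generate_key_square at hpre
  simp only [generate_key_square, generate_key_square_alt]
  have hnil : ([] : List String).Nodup := List.nodup_nil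
  have hJs : ∀ s ∈ pvAlphaStrs, s ≠ "J" := by decide
  have halpha_noJ : ∀ c ∈ pvAlphabet, String.singleton c ≠ "J" :=
    fun c hc => hJs _ (List.mem_map_of_mem hc)
  set cs := (PySem.Str.replace (PySem.Str.upper key) "J" "I").toList with hcs
  have h1 : pvLoop1 cs (List.replicate 5 (List.replicate 5 (none : Option String))) PySem.Set.empty 0 0
      = (mkGrid (capScan cs []), capScan cs [], (capScan cs []).length / 5, (capScan cs []).length % 5) := by
    simpa [mkGrid_nil, PySem.Set.empty] using loop1_eq cs [] hnil (by norm_num)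
  have hp1 : altScan cs PySem.Set.empty [] = (pvDistinct cs [], pvDistinct cs []) := by
    simpa [PySem.Set.empty] using altScan_eq cs [] hnil
  have hdnd : (pvDistinct cs []).Nodup := pvDistinct_nodup cs [] hnil
  have hp2 : altScan pvAlphabet (pvDistinct cs []) (pvDistinct cs [])
      = (pvDistinct pvAlphabet (pvDistinct cs []), pvDistinct pvAlphabet (pvDistinct cs [])) :=
    altScan_eq pvAlphabet _ hdnd
  obtain ⟨t, ht⟩ := pvDistinct_prefix pvAlphabet (pvDistinct cs [])
  have htk : capScan cs [] = (pvDistinct cs []).take 25 := capScan_take cs [] (by norm_num)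
  have hnd1 : (capScan cs []).Nodup := capScan_nodup cs [] hnil
  have hle : (capScan cs []).length ≤ 25 := capScan_len_le cs [] (by norm_num)
  rw [h1]; dsimp only
  rw [hp1]; dsimp only
  rw [hp2]; dsimp only
  rw [ht]
  have hsl := PySem.List.slice_to (xs := pvDistinct cs [] ++ t) (b := 25) (by norm_num)
  norm_num at hsl
  rw [hsl]
  simp only [show Int.toNat 25 = 25 from rfl]
  by_cases hfull : (capScan cs []).length = 25
  · have hdlen : 25 ≤ (pvDistinct cs []).length := by
      have hh := congrArg List.length htk
      simp [List.length_take] at hh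
      omega
    have hsub : ∀ s ∈ capScan cs [], s ∈ pvAlphaStrs := by
      rcases hpre with h | h
      · omega
      · intro s hs; rw [htk] at hs; exact h s hs
    have halen : pvAlphaStrs.length = 25 := by decide
    have hand : pvAlphaStrs.Nodup := by decide
    have hperm : (capScan cs []).Perm pvAlphaStrs :=
      (List.Nodup.subperm hnd1 hsub).perm_of_length_le (by omega)
    have hmem : ∀ c ∈ pvAlphabet, String.singleton c ∈ capScan cs [] := by
      intro c hc
      exact hperm.mem_iff.2 (List.mem_map_of_mem hc)
    rw [loop2_all_seen pvAlphabet _ _ _ _ hmem]; dsimp only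
    have hB : (pvDistinct cs [] ++ t).take 25 = capScan cs [] := by
      rw [List.take_append, htk]
      have h0 : 25 - (pvDistinct cs []).length = 0 := by omega
      simp [h0]
    rw [hB]
    exact final_shape _ hfull
  · have hlt : (capScan cs []).length < 25 := by omega
    have heq : capScan cs [] = pvDistinct cs [] := capScan_lt cs [] (by norm_num) hlt
    rw [loop2_eq_loop1 pvAlphabet halpha_noJ]
    rw [loop1_eq pvAlphabet (capScan cs []) hnd1 hlt]; dsimp only
    have htk2 : capScan pvAlphabet (capScan cs []) = (pvDistinct pvAlphabet (capScan cs [])).take 25 :=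
      capScan_take pvAlphabet _ hlt
    have hlen2 : (capScan pvAlphabet (capScan cs [])).length = 25 := by
      have hle2 : (capScan pvAlphabet (capScan cs [])).length ≤ 25 := capScan_len_le pvAlphabet _ hlt
      by_contra hne
      have hmem : ∀ c ∈ pvAlphabet, String.singleton c ∈ capScan pvAlphabet (capScan cs []) := by
        intro c hc
        rcases capScan_mem_or_full pvAlphabet (capScan cs []) c hc with h | h
        · exact absurd h hne
        · exact h
      have hsub : pvAlphaStrs ⊆ capScan pvAlphabet (capScan cs []) := by
        intro s hs
        obtain ⟨c, hc, rfl⟩ := List.mem_map.1 hs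
        exact hmem c hc
      have hand : pvAlphaStrs.Nodup := by decide
      have h25 := (List.Nodup.subperm hand hsub).length_le
      have halen : pvAlphaStrs.length = 25 := by decide
      omega
    have hB : (pvDistinct cs [] ++ t).take 25 = capScan pvAlphabet (capScan cs []) := by
      rw [← ht, ← heq, ← htk2]
    rw [hB]
    exact final_shape _ hlen2

theorem generate_key_square_raises : Claim_raises_generate_key_square := by
  unfold Claim_raises_generate_key_square
  refine ⟨?_, by decide⟩
  intro key _ hr hpre
  unfold Raises_generate_key_square at hr
  unfold Pre_generate_key_square at hpre
  obtain ⟨h25, s, hs, hnot⟩ := hr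
  rcases hpre with h | h
  · omega
  · exact hnot (h s hs)

-- self-check: the raise witness does lie inside Raises_ (read off the raises theorem)
theorem generate_key_square_raises_ok :
    Raises_generate_key_square pvRaiseWitness_generate_key_square :=
  generate_key_square_raises.2.2.1
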